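-- pv_equiv track=rewrite | github.com/Laogeodritt/quasselflask | quasselflask/search_params.py | convert_glob_to_like
-- ===== SOURCE A (Python) =====
-- def convert_glob_to_like(s: str) -> (str, bool):
--     """
--     Converts a glob-style wildcard string to SQL LIKE syntax. Only handles conversion of * and ? to % and _, plus
--     escaped characters via '\' (no character classes). NOTE: Does not place % around the expression.
--     :param s: Glob string to convert.
--     :return: (like_str, hasWildcards) - hasWildcards is True if a non-escaped wildcard was found.
--     """
--     if s is None:
--         return None
--
--     s_parse = []
--     is_escaped = False
--     has_wildcards = False
--     for c in s:
--         if is_escaped: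
--             if c == '\\':
--                 s_parse.append('\\\\')
--             elif c == '*' or c == '?':
--                 s_parse.append(c)
--             elif c == '_' or c == '%':
--                 s_parse.append('\\' + c)
--             else:
--                 s_parse.append(c)
--             is_escaped = False
--         else:
--             if c == '\\':
--                 is_escaped = True
--             elif c == '*':
--                 s_parse.append('%')
--                 has_wildcards = True
--             elif c == '?':
--                 s_parse.append('_')
--                 has_wildcards = True
--             elif c == '_' or c == '%':
--                 s_parse.append('\\' + c)
--             else:
--                 s_parse.append(c)
--     if is_escaped:  # in case there's a hanging backslash
--         s_parse.append('\\\\')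
--     return ''.join(s_parse), has_wildcards
-- ===== SOURCE B (Python) =====
-- # Staged decomposition: split the string on backslashes first, then translate
-- # each whole segment with str.translate; escape semantics are recovered from
-- # the segment boundaries (empty segment = escaped backslash / hanging one).
-- _PLAIN = str.maketrans({'*': '%', '?': '_', '_': '\\_', '%': '\\%'})
-- _ESC = {'_': '\\_', '%': '\\%'}
--
--
-- def _plain(t):
--     return t.translate(_PLAIN), ('*' in t or '?' in t)
--
--
-- def convert_glob_to_like(s):
--     if s is None:
--         return None
--     segs = s.split('\\')
--     t, wild = _plain(segs[0])
--     parts = [t]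
--     i = 1
--     while i < len(segs):
--         seg = segs[i]
--         i += 1
--         if seg == '':
--             # boundary backslash escaped another backslash, or hangs at the end
--             parts.append('\\\\')
--             if i < len(segs):
--                 t, w = _plain(segs[i])
--                 parts.append(t)
--                 wild = wild or w
--                 i += 1
--         else:
--             # first char of the segment was escaped by the boundary backslash
--             parts.append(_ESC.get(seg[0], seg[0]))
--             t, w = _plain(seg[1:])
--             parts.append(t)
--             wild = wild or w
--     return ''.join(parts), wild
-- ===== Notes on version B (the rewrite author's own statement) =====
-- stated objective: alternative
-- what changed: Replaces A's single character-at-a-time scan with an is_escaped flag by a staged algorithm: split the string on backslashes, translate every segment wholesale with str.translate, and reconstruct the escape semantics from the segment boundaries (empty segment = escaped or hanging backslash, otherwise the segment's first char is the escaped one).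
import Mathlib
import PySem

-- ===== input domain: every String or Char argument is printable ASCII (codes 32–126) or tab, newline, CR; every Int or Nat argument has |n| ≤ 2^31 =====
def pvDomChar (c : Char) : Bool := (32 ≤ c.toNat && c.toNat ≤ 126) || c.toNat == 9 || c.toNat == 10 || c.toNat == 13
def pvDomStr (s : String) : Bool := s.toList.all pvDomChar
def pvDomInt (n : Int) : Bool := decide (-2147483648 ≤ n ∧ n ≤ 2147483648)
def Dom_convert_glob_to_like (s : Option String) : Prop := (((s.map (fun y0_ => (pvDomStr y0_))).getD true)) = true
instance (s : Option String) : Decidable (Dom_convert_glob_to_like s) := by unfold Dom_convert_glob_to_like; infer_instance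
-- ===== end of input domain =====

-- B replaces A's escape-flag character scan by a staged algorithm: split on backslashes,
-- translate each whole segment, rebuild escapes from the segment boundaries (an
-- alternative staged decomposition of the same task).

-- ===== PORT A =====
-- state: (s_parse, is_escaped, has_wildcards)
def aStep (st : List String × Bool × Bool) (c : Char) : List String × Bool × Bool :=
  let acc := st.1; let esc := st.2.1; let w := st.2.2
  if esc then
    if c = '\\' then (acc ++ ["\\\\"], false, w)
    else if c = '*' ∨ c = '?' then (acc ++ [String.ofList [c]], false, w)
    else if c = '_' ∨ c = '%' then (acc ++ [String.ofList ['\\', c]], false, w)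
    else (acc ++ [String.ofList [c]], false, w)
  else
    if c = '\\' then (acc, true, w)
    else if c = '*' then (acc ++ ["%"], false, true)
    else if c = '?' then (acc ++ ["_"], false, true)
    else if c = '_' ∨ c = '%' then (acc ++ [String.ofList ['\\', c]], false, w)
    else (acc ++ [String.ofList [c]], false, w)

def convert_glob_to_like (s : Option String) : Option (String × Bool) :=
  s.map (fun str =>
    let st := str.toList.foldl aStep ([], false, false)
    let acc := if st.2.1 then st.1 ++ ["\\\\"] else st.1
    (String.join acc, st.2.2))

-- ===== PORT B =====
-- the str.translate table _PLAIN, as a per-character mapping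
def transC (c : Char) : String :=
  if c = '*' then "%" else if c = '?' then "_"
  else if c = '_' then "\\_" else if c = '%' then "\\%" else String.ofList [c]

-- _ESC.get(c, c)
def escC (c : Char) : String :=
  if c = '_' then "\\_" else if c = '%' then "\\%" else String.ofList [c]

-- _plain(t): (t.translate(_PLAIN), '*' in t or '?' in t)
def plainT (t : List Char) : String × Bool :=
  (String.join (t.map transC), t.contains '*' || t.contains '?')

-- the while loop over the remaining segments (consumes one or two segments per round)
def segLoop (parts : List String) (wild : Bool) : List (List Char) → List String × Bool
  | [] => (parts, wild)
  | [] :: rest =>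
      match rest with
      | [] => (parts ++ ["\\\\"], wild)
      | nxt :: rest' =>
          segLoop (parts ++ ["\\\\", (plainT nxt).1]) (wild || (plainT nxt).2) rest'
  | (c :: cs) :: rest =>
      segLoop (parts ++ [escC c, (plainT cs).1]) (wild || (plainT cs).2) rest

def convert_glob_to_like_alt (s : Option String) : Option (String × Bool) :=
  s.map (fun str =>
    match PySem.Chars.splitOn str.toList ['\\'] with
    | [] => ("", false)  -- unreachable: split('\\') always yields at least one segment
    | h :: rest =>
        let r := segLoop [(plainT h).1] (plainT h).2 rest
        (String.join r.1, r.2))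

-- ===== PRECONDITION & SPEC =====
def Spec_convert_glob_to_like (s : Option String) (out : Option (String × Bool)) : Prop := out = convert_glob_to_like_alt s
instance (s : Option String) (out : Option (String × Bool)) : Decidable (Spec_convert_glob_to_like s out) := by unfold Spec_convert_glob_to_like; infer_instance

-- ===== CLAIM (what is proved, stated in full; the proofs are below) =====
def Claim_equal_convert_glob_to_like : Prop := ∀ (s : Option String), Dom_convert_glob_to_like s → Spec_convert_glob_to_like s (convert_glob_to_like s)

-- ===== LEMMAS AND PROOFS =====

-- String.join basics
theorem str_foldl_acc (l : List String) : ∀ a : String, l.foldl (· ++ ·) a = a ++ l.foldl (· ++ ·) "" := by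
  induction l with
  | nil => intro a; simp
  | cons x xs ih =>
      intro a
      simp only [List.foldl_cons]
      rw [ih (a ++ x), ih ("" ++ x)]
      simp [String.append_assoc]

theorem join_nil : String.join ([] : List String) = "" := rfl

theorem join_cons (s : String) (l : List String) : String.join (s :: l) = s ++ String.join l := by
  simp only [String.join, List.foldl_cons]
  rw [str_foldl_acc l ("" ++ s)]
  simp

theorem join_append (a b : List String) : String.join (a ++ b) = String.join a ++ String.join b := by
  induction a with
  | nil => simp [join_nil]
  | cons x xs ih => simp [join_cons, ih, String.append_assoc]

-- the split-on-backslash function, in directly recursive form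
def mapHead (f : List Char → List Char) : List (List Char) → List (List Char)
  | [] => [f []]
  | h :: t => f h :: t

def mySplit : List Char → List (List Char)
  | [] => [[]]
  | c :: cs => if c = '\\' then [] :: mySplit cs else mapHead (c :: ·) (mySplit cs)

theorem mySplit_ne_nil (cs : List Char) : mySplit cs ≠ [] := by
  cases cs with
  | nil => simp [mySplit]
  | cons c cs =>
      simp only [mySplit]
      split
      · simp
      · cases h : mySplit cs <;> simp [mapHead]

theorem mySplit_cons (cs : List Char) : ∃ h t, mySplit cs = h :: t := by
  cases hm : mySplit cs with
  | nil => exact absurd hm (mySplit_ne_nil cs)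
  | cons a b => exact ⟨a, b, rfl⟩

theorem go_bs : ∀ (fuel : Nat) (l : List Char), l.length ≤ fuel → ∀ (cur : List Char) (acc : List (List Char)),
    PySem.Chars.splitOn.go ['\\'] fuel l cur acc
      = acc.reverse ++ mapHead (fun x => cur.reverse ++ x) (mySplit l) := by
  intro fuel
  induction fuel with
  | zero =>
      intro l hl cur acc
      cases l with
      | nil => simp [PySem.Chars.splitOn.go, mySplit, mapHead]
      | cons c cs => simp at hl
  | succ f ih =>
      intro l hl cur acc
      cases l with
      | nil => simp [PySem.Chars.splitOn.go, mySplit, mapHead]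
      | cons c rest =>
          have hr : rest.length ≤ f := by simpa using hl
          by_cases hc : c = '\\'
          · subst hc
            have hpre : List.isPrefixOf ['\\'] ('\\' :: rest) = true := by
              simp [List.isPrefixOf]
            simp only [PySem.Chars.splitOn.go, hpre, if_true, List.length_cons, List.length_nil,
              List.drop_succ_cons, List.drop_zero]
            rw [ih rest hr [] (cur.reverse :: acc)]
            obtain ⟨h, t, hm⟩ := mySplit_cons rest
            simp [mySplit, mapHead, hm]
          · have hpre : List.isPrefixOf ['\\'] (c :: rest) = false := by
              simp [List.isPrefixOf, beq_eq_false_iff_ne.mpr (Ne.symm hc)]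
            simp only [PySem.Chars.splitOn.go, hpre, Bool.false_eq_true, if_false]
            rw [ih rest hr (c :: cur) acc]
            obtain ⟨h, t, hm⟩ := mySplit_cons rest
            simp [mySplit, mapHead, hm, hc]

theorem splitOn_bs (cs : List Char) : PySem.Chars.splitOn cs ['\\'] = mySplit cs := by
  unfold PySem.Chars.splitOn
  rw [go_bs (cs.length + 1) cs (by omega) [] []]
  obtain ⟨h, t, hm⟩ := mySplit_cons cs
  simp [mapHead, hm]

-- aStep, characterised through B's tables
theorem aStep_bs_plain (acc : List String) (w : Bool) :
    aStep (acc, false, w) '\\' = (acc, true, w) := rfl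

theorem aStep_bs_esc (acc : List String) (w : Bool) :
    aStep (acc, true, w) '\\' = (acc ++ ["\\\\"], false, w) := rfl

theorem aStep_plain' (acc : List String) (w : Bool) (c : Char) (hc : c ≠ '\\') :
    aStep (acc, false, w) c = (acc ++ [transC c], false, w || ('*' == c || '?' == c)) := by
  by_cases h2 : c = '*'
  · subst h2; simp [aStep, transC]
  by_cases h3 : c = '?'
  · subst h3; simp [aStep, transC, h2]
  by_cases h4 : c = '_'
  · subst h4; have ht : transC '_' = "\\_" := by decide
    simp [aStep, ht, h2, h3, beq_eq_false_iff_ne.mpr (Ne.symm h2), beq_eq_false_iff_ne.mpr (Ne.symm h3)]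
  by_cases h5 : c = '%'
  · subst h5; have ht : transC '%' = "\\%" := by decide
    simp [aStep, ht, h2, h3, beq_eq_false_iff_ne.mpr (Ne.symm h2), beq_eq_false_iff_ne.mpr (Ne.symm h3)]
  · have ht : transC c = String.ofList [c] := by simp [transC, h2, h3, h4, h5]
    simp [aStep, ht, hc, h2, h3, h4, h5,
      beq_eq_false_iff_ne.mpr (Ne.symm h2), beq_eq_false_iff_ne.mpr (Ne.symm h3)]

theorem aStep_esc' (acc : List String) (w : Bool) (d : Char) (hd : d ≠ '\\') :
    aStep (acc, true, w) d = (acc ++ [escC d], false, w) := by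
  by_cases h2 : d = '*'
  · subst h2; simp [aStep, escC]
  by_cases h3 : d = '?'
  · subst h3; simp [aStep, escC]
  by_cases h4 : d = '_'
  · subst h4; have ht : escC '_' = "\\_" := by decide
    simp [aStep, ht]
  by_cases h5 : d = '%'
  · subst h5; have ht : escC '%' = "\\%" := by decide
    simp [aStep, ht]
  · have ht : escC d = String.ofList [d] := by simp [escC, h4, h5]
    simp [aStep, ht, hd, h2, h3, h4, h5]

theorem aStep_acc (acc : List String) (e w : Bool) (c : Char) :
    aStep (acc, e, w) c = (acc ++ (aStep ([], e, w) c).1, (aStep ([], e, w) c).2) := by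
  cases e <;> (simp only [aStep]; split_ifs <;> simp)

theorem foldA_acc (cs : List Char) : ∀ (acc : List String) (e w : Bool),
    cs.foldl aStep (acc, e, w)
      = (acc ++ (cs.foldl aStep ([], e, w)).1, (cs.foldl aStep ([], e, w)).2) := by
  induction cs with
  | nil => intro acc e w; simp
  | cons c cs ih =>
      intro acc e w
      rw [List.foldl_cons, List.foldl_cons, aStep_acc acc e w c]
      rcases h : aStep ([], e, w) c with ⟨a1, e1, w1⟩
      rw [ih (acc ++ a1) e1 w1, ih a1 e1 w1]
      simp

theorem segLoop_acc_n : ∀ (n : Nat) (segs : List (List Char)), segs.length ≤ n →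
    ∀ (parts : List String) (w : Bool),
    segLoop parts w segs = (parts ++ (segLoop [] w segs).1, (segLoop [] w segs).2) := by
  intro n
  induction n with
  | zero =>
      intro segs h parts w
      cases segs with
      | nil => simp [segLoop]
      | cons a b => simp at h
  | succ n ih =>
      intro segs h parts w
      match segs with
      | [] => simp [segLoop]
      | [] :: rest =>
          cases rest with
          | nil => simp [segLoop]
          | cons nxt rest' =>
              have e1 : ∀ p, segLoop p w ([] :: nxt :: rest')
                  = segLoop (p ++ ["\\\\", (plainT nxt).1]) (w || (plainT nxt).2) rest' := fun p => rfl
              rw [e1 parts, e1 []]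
              have hr : rest'.length ≤ n := by simp at h; omega
              rw [ih rest' hr (parts ++ ["\\\\", (plainT nxt).1]) (w || (plainT nxt).2),
                  ih rest' hr ([] ++ ["\\\\", (plainT nxt).1]) (w || (plainT nxt).2)]
              simp
      | (c :: cs) :: rest =>
          have e1 : ∀ p, segLoop p w ((c :: cs) :: rest)
              = segLoop (p ++ [escC c, (plainT cs).1]) (w || (plainT cs).2) rest := fun p => rfl
          rw [e1 parts, e1 []]
          have hr : rest.length ≤ n := by simp at h; omega
          rw [ih rest hr (parts ++ [escC c, (plainT cs).1]) (w || (plainT cs).2),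
              ih rest hr ([] ++ [escC c, (plainT cs).1]) (w || (plainT cs).2)]
          simp

theorem segLoop_acc (segs : List (List Char)) (parts : List String) (w : Bool) :
    segLoop parts w segs = (parts ++ (segLoop [] w segs).1, (segLoop [] w segs).2) :=
  segLoop_acc_n segs.length segs (le_refl _) parts w

-- joined views
def jf (r : List String × Bool) : String × Bool := (String.join r.1, r.2)

def aFinish (st : List String × Bool × Bool) : List String × Bool :=
  ((if st.2.1 then st.1 ++ ["\\\\"] else st.1), st.2.2)

def Pfun (w : Bool) : List (List Char) → List String × Bool
  | [] => ([], w)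
  | h :: rest => segLoop [(plainT h).1] (w || (plainT h).2) rest

theorem jf_aFinish_acc (a : List String) (st : List String × Bool × Bool) :
    jf (aFinish (a ++ st.1, st.2))
      = (String.join a ++ (jf (aFinish st)).1, (jf (aFinish st)).2) := by
  rcases st with ⟨acc, e, w⟩
  cases e <;> simp [aFinish, jf, join_append]

theorem jf_segLoop_acc (parts : List String) (w : Bool) (segs : List (List Char)) :
    jf (segLoop parts w segs)
      = (String.join parts ++ (jf (segLoop [] w segs)).1, (jf (segLoop [] w segs)).2) := by
  rw [segLoop_acc]; simp [jf, join_append]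

theorem plainT_cons (c : Char) (h : List Char) :
    plainT (c :: h)
      = (transC c ++ (plainT h).1, ('*' == c || h.contains '*') || ('?' == c || h.contains '?')) := by
  show (String.join (List.map transC (c :: h)), (c :: h).contains '*' || (c :: h).contains '?') = _
  rw [List.map_cons, join_cons, List.contains_cons, List.contains_cons]
  rfl

theorem main_lemma (cs : List Char) : ∀ w : Bool,
    (jf (aFinish (cs.foldl aStep ([], false, w))) = jf (Pfun w (mySplit cs)))
    ∧ (jf (aFinish (cs.foldl aStep ([], true, w))) = jf (segLoop [] w (mySplit cs))) := by
  induction cs with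
  | nil =>
      intro w
      cases w <;> exact ⟨by decide, by decide⟩
  | cons c cs ih =>
      intro w
      obtain ⟨h, t, hm⟩ := mySplit_cons cs
      constructor
      · by_cases hc : c = '\\'
        · subst hc
          rw [List.foldl_cons, aStep_bs_plain, (ih w).2]
          rw [show mySplit ('\\' :: cs) = [] :: mySplit cs from by simp [mySplit]]
          rw [show Pfun w ([] :: mySplit cs)
                = segLoop [(plainT ([] : List Char)).1] (w || (plainT ([] : List Char)).2) (mySplit cs) from rfl]
          rw [show plainT ([] : List Char) = ("", false) from rfl]
          rw [jf_segLoop_acc [""] (w || false) (mySplit cs)]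
          simp [jf, join_cons, join_nil]
        · rw [List.foldl_cons, aStep_plain' [] w c hc]
          simp only [List.nil_append]
          rw [foldA_acc cs [transC c] false (w || ('*' == c || '?' == c)),
              jf_aFinish_acc [transC c] (cs.foldl aStep ([], false, (w || ('*' == c || '?' == c)))),
              (ih (w || ('*' == c || '?' == c))).1]
          rw [show mySplit (c :: cs) = mapHead (c :: ·) (mySplit cs) from by simp [mySplit, hc], hm]
          rw [show mapHead (c :: ·) (h :: t) = (c :: h) :: t from rfl]
          rw [show Pfun w ((c :: h) :: t)
                = segLoop [(plainT (c :: h)).1] (w || (plainT (c :: h)).2) t from rfl]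
          rw [show Pfun (w || ('*' == c || '?' == c)) (h :: t)
                = segLoop [(plainT h).1] ((w || ('*' == c || '?' == c)) || (plainT h).2) t from rfl]
          rw [plainT_cons]
          have hflag : ((w || ('*' == c || '?' == c)) || (plainT h).2)
              = (w || (('*' == c || h.contains '*') || ('?' == c || h.contains '?'))) := by
            simp [plainT, Bool.or_assoc, Bool.or_left_comm]
          rw [← hflag]
          rw [jf_segLoop_acc [(plainT h).1] ((w || ('*' == c || '?' == c)) || (plainT h).2) t,
              jf_segLoop_acc [transC c ++ (plainT h).1] ((w || ('*' == c || '?' == c)) || (plainT h).2) t]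
          simp [join_cons, join_nil, String.append_assoc]
      · rw [List.foldl_cons]
        by_cases hc : c = '\\'
        · subst hc
          rw [aStep_bs_esc]
          simp only [List.nil_append]
          rw [foldA_acc cs ["\\\\"] false w,
              jf_aFinish_acc ["\\\\"] (cs.foldl aStep ([], false, w)),
              (ih w).1]
          rw [show mySplit ('\\' :: cs) = [] :: mySplit cs from by simp [mySplit], hm]
          rw [show segLoop [] w ([] :: h :: t)
                = segLoop ([] ++ ["\\\\", (plainT h).1]) (w || (plainT h).2) t from rfl]
          rw [show Pfun w (h :: t) = segLoop [(plainT h).1] (w || (plainT h).2) t from rfl]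
          rw [jf_segLoop_acc [(plainT h).1] (w || (plainT h).2) t,
              jf_segLoop_acc ([] ++ ["\\\\", (plainT h).1]) (w || (plainT h).2) t]
          simp [join_cons, join_nil, String.append_assoc]
        · rw [aStep_esc' [] w c hc]
          simp only [List.nil_append]
          rw [foldA_acc cs [escC c] false w,
              jf_aFinish_acc [escC c] (cs.foldl aStep ([], false, w)),
              (ih w).1]
          rw [show mySplit (c :: cs) = mapHead (c :: ·) (mySplit cs) from by simp [mySplit, hc], hm]
          rw [show mapHead (c :: ·) (h :: t) = (c :: h) :: t from rfl]
          rw [show segLoop [] w ((c :: h) :: t)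
                = segLoop ([] ++ [escC c, (plainT h).1]) (w || (plainT h).2) t from rfl]
          rw [show Pfun w (h :: t) = segLoop [(plainT h).1] (w || (plainT h).2) t from rfl]
          rw [jf_segLoop_acc [(plainT h).1] (w || (plainT h).2) t,
              jf_segLoop_acc ([] ++ [escC c, (plainT h).1]) (w || (plainT h).2) t]
          simp [join_cons, join_nil, String.append_assoc]

-- ===== VERDICT (by name: the statement is the Claim_ definition above) =====
theorem convert_glob_to_like_spec : Claim_equal_convert_glob_to_like := by
  intro s _
  unfold Spec_convert_glob_to_like convert_glob_to_like convert_glob_to_like_alt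
  cases s with
  | none => rfl
  | some str =>
      simp only [Option.map_some]
      rw [show (let st := str.toList.foldl aStep ([], false, false)
                let acc := if st.2.1 then st.1 ++ ["\\\\"] else st.1
                (String.join acc, st.2.2))
            = jf (aFinish (str.toList.foldl aStep ([], false, false))) from rfl]
      rw [(main_lemma str.toList false).1, splitOn_bs]
      obtain ⟨h, t, hm⟩ := mySplit_cons str.toList
      rw [hm]
      congr 1
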